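-- pv_equiv track=rewrite | github.com/alreich/abstract_algebra | src/table_utils.py | is_commutative
-- ===== SOURCE A (Python) =====
-- def is_commutative(table):
--     indices = range(len(table))
--     result = True
--     for a in indices:
--         for b in indices:
--             if table[a][b] != table[b][a]:
--                 result = False
--                 break
--     return result
-- ===== SOURCE B (Python) =====
-- def is_commutative(table):
--     n = len(table)
--     block = [row[:n] for row in table]
--     transpose = [list(col) for col in zip(*block)]
--     return block == transpose
-- ===== Notes on version B (the rewrite author's own statement) =====
-- stated objective: idiomatic
-- what changed: B slices out the n-by-n operation block, builds its transpose in one pass with zip(*block), and returns a single whole-matrix equality, instead of A's index-based double loop comparing entries pairwise.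
import Mathlib
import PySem

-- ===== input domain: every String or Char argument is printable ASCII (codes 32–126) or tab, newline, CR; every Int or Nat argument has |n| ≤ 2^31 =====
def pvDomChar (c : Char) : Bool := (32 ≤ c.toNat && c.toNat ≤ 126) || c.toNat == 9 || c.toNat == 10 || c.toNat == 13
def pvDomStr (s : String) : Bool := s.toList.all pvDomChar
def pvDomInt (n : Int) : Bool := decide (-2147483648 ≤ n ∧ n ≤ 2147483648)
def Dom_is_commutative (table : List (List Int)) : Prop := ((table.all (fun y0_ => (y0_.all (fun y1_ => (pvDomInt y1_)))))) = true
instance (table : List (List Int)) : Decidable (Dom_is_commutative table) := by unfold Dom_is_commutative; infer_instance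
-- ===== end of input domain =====

-- B replaces A's index-based double loop by building the n×n block's transpose with zip in one
-- pass and returning a single whole-matrix equality (objective: idiomatic; no mutation involved).

-- ===== PORT A =====
-- inner 'for b in indices' loop with its break; result is threaded through
def pvInnerA (table : List (List Int)) (a : Int) : List Int → Bool → Bool
  | [], result => result
  | b :: bs, result =>
    if PySem.List.pyGetD (PySem.List.pyGetD table a []) b 0 ≠
       PySem.List.pyGetD (PySem.List.pyGetD table b []) a 0 then
      false  -- result = False; break
    else
      pvInnerA table a bs result

def is_commutative (table : List (List Int)) : Bool :=
  let indices := PySem.List.pyRange 0 (table.length : Int) 1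
  indices.foldl (fun result a => pvInnerA table a indices result) true

-- ===== PORT B =====
-- zip(*rows): truncates at the shortest row; zip of an empty argument list gives []
def pvTranspose : List (List Int) → List (List Int)
  | [] => []
  | r :: rs =>
    if (r :: rs).any (·.isEmpty) then []
    else ((r :: rs).map (fun x => x.headD 0)) :: pvTranspose ((r :: rs).map (fun x => x.tail))
termination_by rows => (rows.headD []).length
decreasing_by
  rename_i h
  simp only [List.map_cons, List.headD_cons]
  simp only [List.any_cons, Bool.or_eq_true, not_or] at h
  cases r with
  | nil => simp at h
  | cons x xs => simp

def is_commutative_alt (table : List (List Int)) : Bool :=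
  let n : Int := table.length
  let block := table.map (fun row => PySem.List.slice row none (some n))
  block == pvTranspose block

-- ===== PRECONDITION & SPEC =====
-- entry (i, j) of the table as A's subscripts read it, Nat indices (used by Pre_ and the proofs)
def pvG (t : List (List Int)) (i j : Nat) : Int := (t.getD i []).getD j 0

-- Pre_ holds exactly when A completes without IndexError: every out-of-range subscript A would
-- reach is pre-empted by an earlier in-range mismatch in the same inner scan (which breaks it);
-- in particular every table whose rows all have at least as many entries as there are rows.
def Pre_is_commutative (table : List (List Int)) : Prop :=
  ∀ a < table.length, ∀ b < table.length,
    ((table.getD a []).length ≤ b ∨ (table.getD b []).length ≤ a) →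
    ∃ b' < b, b' < (table.getD a []).length ∧ a < (table.getD b' []).length ∧
      pvG table a b' ≠ pvG table b' a
instance (table : List (List Int)) : Decidable (Pre_is_commutative table) := by
  unfold Pre_is_commutative; infer_instance

def pvWitness_is_commutative : List (List Int) := [[0, 1], [1, 5]]

def Spec_is_commutative (table : List (List Int)) (out : Bool) : Prop := out = is_commutative_alt table
instance (table : List (List Int)) (out : Bool) : Decidable (Spec_is_commutative table out) := by unfold Spec_is_commutative; infer_instance

-- ===== CLAIM (what is proved, stated in full; the proofs are below) =====
def Claim_equal_is_commutative : Prop := ∀ (table : List (List Int)), Dom_is_commutative table → Pre_is_commutative table → Spec_is_commutative table (is_commutative table)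

-- ===== LEMMAS AND PROOFS =====

lemma pvInnerA_eq (t : List (List Int)) (a : Int) (bs : List Int) (r : Bool) :
    pvInnerA t a bs r =
      if bs.all (fun b => PySem.List.pyGetD (PySem.List.pyGetD t a []) b 0 ==
                          PySem.List.pyGetD (PySem.List.pyGetD t b []) a 0) then r else false := by
  induction bs with
  | nil => simp [pvInnerA]
  | cons b bs ih =>
    simp only [pvInnerA, List.all_cons]
    by_cases h : PySem.List.pyGetD (PySem.List.pyGetD t a []) b 0 =
                 PySem.List.pyGetD (PySem.List.pyGetD t b []) a 0
    · simp [h, ih]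
    · simp [h]

lemma pvFoldl_keep (p : Int → Bool) (l : List Int) (r : Bool) :
    l.foldl (fun r a => if p a then r else false) r = (r && l.all p) := by
  have hc : l.foldl (fun r a => if p a then r else false) r =
      l.foldl (fun ok x => if !p x then false else ok) r := by
    apply PySem.List.foldl_congr_mem
    intro acc x _
    cases p x <;> simp
  rw [hc, PySem.List.foldl_if_false_eq]
  simp [List.all_eq_not_any_not]

-- A = true ↔ the n×n block is symmetric (Nat-indexed)
lemma isCommA_iff (t : List (List Int)) :
    is_commutative t = true ↔ ∀ i < t.length, ∀ j < t.length, pvG t i j = pvG t j i := by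
  unfold is_commutative
  show (PySem.List.pyRange 0 (t.length : Int) 1).foldl
      (fun result a => pvInnerA t a (PySem.List.pyRange 0 (t.length : Int) 1) result) true = true ↔ _
  have e2 : (fun (result : Bool) (a : Int) =>
        pvInnerA t a (PySem.List.pyRange 0 (t.length : Int) 1) result)
      = (fun result a => if (PySem.List.pyRange 0 (t.length : Int) 1).all
          (fun b => PySem.List.pyGetD (PySem.List.pyGetD t a []) b 0 ==
                    PySem.List.pyGetD (PySem.List.pyGetD t b []) a 0) then result else false) := by
    funext r a
    exact pvInnerA_eq t a _ r
  rw [e2, pvFoldl_keep]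
  simp only [Bool.true_and, List.all_eq_true]
  constructor
  · intro h i hi j hj
    have ha := h (i : Int) (by rw [PySem.List.mem_pyRange_one]; omega)
    have := ha (j : Int) (by rw [PySem.List.mem_pyRange_one]; omega)
    simpa [pvG, PySem.List.pyGetD_natCast] using this
  · intro h a ha b hb
    rw [PySem.List.mem_pyRange_one] at ha hb
    obtain ⟨i, rfl⟩ : ∃ i : Nat, a = (i : Int) := ⟨a.toNat, by omega⟩
    obtain ⟨j, rfl⟩ : ∃ j : Nat, b = (j : Int) := ⟨b.toNat, by omega⟩
    simp only [PySem.List.pyGetD_natCast, beq_iff_eq]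
    exact h i (by omega) j (by omega)

-- the transpose of a nonempty rectangular table, in closed form
lemma pvTranspose_char (m : Nat) :
    ∀ t : List (List Int), t ≠ [] → (∀ r ∈ t, r.length = m) →
      pvTranspose t = (List.range m).map (fun j => t.map (fun row => row.getD j 0)) := by
  induction m with
  | zero =>
    intro t hne hlen
    obtain ⟨r0, rs0, rfl⟩ : ∃ r0 rs0, t = r0 :: rs0 := by
      cases t with
      | nil => exact absurd rfl hne
      | cons a l => exact ⟨a, l, rfl⟩
    rw [pvTranspose, if_pos]
    · simp
    · rw [List.any_eq_true]
      exact ⟨r0, List.mem_cons_self, by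
        simpa [List.isEmpty_iff, List.length_eq_zero_iff] using hlen r0 List.mem_cons_self⟩
  | succ m ih =>
    intro t hne hlen
    obtain ⟨r0, rs0, rfl⟩ : ∃ r0 rs0, t = r0 :: rs0 := by
      cases t with
      | nil => exact absurd rfl hne
      | cons a l => exact ⟨a, l, rfl⟩
    have hnoempty : ¬ ((r0 :: rs0).any (·.isEmpty)) = true := by
      intro hany
      rw [List.any_eq_true] at hany
      obtain ⟨r, hr, hemp⟩ := hany
      have hl := hlen r hr
      simp only [List.isEmpty_iff] at hemp
      rw [hemp] at hl
      simp at hl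
    rw [pvTranspose, if_neg hnoempty]
    have htail : ∀ r ∈ (r0 :: rs0).map (fun r : List Int => r.tail), r.length = m := by
      intro r hr
      simp only [List.mem_map] at hr
      obtain ⟨y, hy, rfl⟩ := hr
      have := hlen y hy
      simp [this]
    have hne' : (r0 :: rs0).map (fun r : List Int => r.tail) ≠ [] := by simp
    rw [ih _ hne' htail, List.range_succ_eq_map]
    conv_rhs => rw [List.map_cons]
    congr 1
    · apply List.map_congr_left
      intro r hr
      have hl := hlen r hr
      cases r with
      | nil => simp at hl
      | cons x xs => simp
    · rw [List.map_map]
      apply List.map_congr_left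
      intro j _
      simp only [Function.comp, List.map_map]
      apply List.map_congr_left
      intro r hr
      have hl := hlen r hr
      cases r with
      | nil => simp at hl
      | cons x xs => simp

lemma pvG_eq (t : List (List Int)) (hsq : ∀ r ∈ t, r.length = t.length)
    {i j : Nat} (hi : i < t.length) (hj : j < t.length) :
    pvG t i j = (t[i]'hi)[j]'(by rw [hsq (t[i]'hi) (t.getElem_mem hi)]; exact hj) := by
  unfold pvG
  rw [List.getD_eq_getElem _ _ hi,
      List.getD_eq_getElem _ _ (by rw [hsq (t[i]'hi) (t.getElem_mem hi)]; exact hj)]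

-- a square table equals its transpose iff it is symmetric
lemma pvEqTranspose_iff (t : List (List Int)) (hsq : ∀ r ∈ t, r.length = t.length) :
    (t == pvTranspose t) = true ↔ ∀ i < t.length, ∀ j < t.length, pvG t i j = pvG t j i := by
  rw [beq_iff_eq]
  rcases eq_or_ne t [] with rfl | hne
  · rw [pvTranspose]
    simp
  · rw [pvTranspose_char t.length t hne hsq]
    constructor
    · intro h i hi j hj
      have key : t[i]'hi = t.map (fun row => row.getD i 0) := by
        have h1 := List.getElem_of_eq h hi
        rw [h1]
        simp
      rw [pvG_eq t hsq hi hj, pvG_eq t hsq hj hi]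
      have e1 := List.getElem_of_eq key
          (show j < (t[i]'hi).length by rw [hsq _ (t.getElem_mem hi)]; exact hj)
      rw [e1]
      simp only [List.getElem_map]
      rw [List.getD_eq_getElem _ _ (by rw [hsq _ (t.getElem_mem hj)]; exact hi)]
    · intro h
      apply List.ext_getElem (by simp)
      intro i h1 h2
      simp only [List.getElem_map, List.getElem_range]
      apply List.ext_getElem (by simp [hsq _ (t.getElem_mem h1)])
      intro j hj1 hj2
      simp only [List.getElem_map]
      have hjn : j < t.length := by simpa using hj2
      rw [List.getD_eq_getElem _ _ (by rw [hsq _ (t.getElem_mem hjn)]; exact h1)]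
      have hh := h i h1 j hjn
      rw [pvG_eq t hsq h1 hjn, pvG_eq t hsq hjn h1] at hh
      exact hh

-- every row of the transpose has as many entries as the argument has rows
lemma pvTranspose_row_len (s : List (List Int)) :
    ∀ r ∈ pvTranspose s, r.length = s.length := by
  induction s using pvTranspose.induct with
  | case1 => simp [pvTranspose]
  | case2 r rs hcond =>
    rw [pvTranspose, if_pos hcond]
    simp
  | case3 r rs hcond ih =>
    rw [pvTranspose, if_neg hcond]
    intro x hx
    rcases List.mem_cons.mp hx with rfl | hx
    · simp
    · have := ih x hx
      simpa using this

-- a table with a row of the wrong length is never equal to its transpose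
lemma pvAltFalse (t : List (List Int)) (h : ∃ r ∈ t, r.length ≠ t.length) :
    (t == pvTranspose t) = false := by
  rw [beq_eq_false_iff_ne]
  intro heq
  obtain ⟨r, hr, hlen⟩ := h
  rw [heq] at hr
  exact hlen (pvTranspose_row_len t r hr)

-- the leading n×n block of a table whose rows have length ≥ n
lemma pvBlock_sq (t : List (List Int)) (hpre : ∀ row ∈ t, t.length ≤ row.length) :
    ∀ r ∈ t.map (fun row => row.take t.length),
      r.length = (t.map (fun row => row.take t.length)).length := by
  intro r hr
  simp only [List.mem_map] at hr
  obtain ⟨y, hy, rfl⟩ := hr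
  have := hpre y hy
  simp [this]

-- block entries agree with table entries inside the block
lemma pvG_block (t : List (List Int)) (hpre : ∀ row ∈ t, t.length ≤ row.length)
    {i j : Nat} (hi : i < t.length) (hj : j < t.length) :
    pvG (t.map (fun row => row.take t.length)) i j = pvG t i j := by
  unfold pvG
  have hgi : (t.map (fun row => row.take t.length)).getD i [] = (t[i]'hi).take t.length := by
    rw [List.getD_eq_getElem _ _ (by simpa using hi)]
    simp
  have hti : t.getD i [] = t[i]'hi := List.getD_eq_getElem _ _ hi
  rw [hgi, hti]
  have hlen : t.length ≤ (t[i]'hi).length := hpre _ (List.getElem_mem hi)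
  rw [List.getD_eq_getElem _ _ (by simp only [List.length_take]; omega),
      List.getD_eq_getElem _ _ (by omega)]
  exact List.getElem_take

-- ===== VERDICT (by name: the statement is the Claim_ definition above) =====
theorem is_commutative_spec : Claim_equal_is_commutative := by
  intro t _ hpre
  unfold Spec_is_commutative
  have halt : is_commutative_alt t =
      (t.map (fun row => row.take t.length) == pvTranspose (t.map (fun row => row.take t.length))) := by
    unfold is_commutative_alt
    simp [PySem.List.slice_to_natCast]
  rw [halt]
  have hA := isCommA_iff t
  by_cases hcase : ∀ a < t.length, t.length ≤ (t.getD a []).length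
  · -- every row long enough: the block is square and entries agree with the table
    have hpre' : ∀ row ∈ t, t.length ≤ row.length := by
      intro r hr
      obtain ⟨i, hi, rfl⟩ := List.getElem_of_mem hr
      have := hcase i hi
      rwa [List.getD_eq_getElem _ _ hi] at this
    have hB := pvEqTranspose_iff (t.map (fun row => row.take t.length)) (pvBlock_sq t hpre')
    have hlen : (t.map (fun row => row.take t.length)).length = t.length := by simp
    have hsym : (∀ i < (t.map (fun row => row.take t.length)).length,
          ∀ j < (t.map (fun row => row.take t.length)).length,
            pvG (t.map (fun row => row.take t.length)) i j
              = pvG (t.map (fun row => row.take t.length)) j i)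
        ↔ (∀ i < t.length, ∀ j < t.length, pvG t i j = pvG t j i) := by
      rw [hlen]
      constructor
      · intro h i hi j hj
        have := h i hi j hj
        rwa [pvG_block t hpre' hi hj, pvG_block t hpre' hj hi] at this
      · intro h i hi j hj
        rw [pvG_block t hpre' hi hj, pvG_block t hpre' hj hi]
        exact h i hi j hj
    rw [hsym] at hB
    cases hA' : is_commutative t
      <;> cases hB' : (t.map (fun row => row.take t.length)
          == pvTranspose (t.map (fun row => row.take t.length)))
    · rfl
    · rw [hA'] at hA
      rw [hB'] at hB
      exact absurd (hA.mpr (hB.mp rfl)) (by simp)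
    · rw [hA'] at hA
      rw [hB'] at hB
      exact absurd (hB.mpr (hA.mp rfl)) (by simp)
    · rfl
  · -- some row is too short: Pre_ supplies an in-range mismatch, so both sides are False
    rcases not_forall.mp hcase with ⟨a0, ha0⟩
    rcases Classical.not_imp.mp ha0 with ⟨ha0n, hshort⟩
    rw [not_le] at hshort
    obtain ⟨b', hb', _, _, hne⟩ :=
      hpre a0 ha0n (t.getD a0 []).length hshort (Or.inl le_rfl)
    have hsymfail : ¬ (∀ i < t.length, ∀ j < t.length, pvG t i j = pvG t j i) :=
      fun hs => hne (hs a0 ha0n b' (by omega))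
    have hAf : is_commutative t = false := by
      cases hA' : is_commutative t
      · rfl
      · exact absurd (hA.mp hA') hsymfail
    have hBf : (t.map (fun row => row.take t.length)
        == pvTranspose (t.map (fun row => row.take t.length))) = false := by
      apply pvAltFalse
      refine ⟨(t.getD a0 []).take t.length, List.mem_map.mpr ⟨t.getD a0 [],
        List.getD_eq_getElem _ _ ha0n ▸ List.getElem_mem ha0n, rfl⟩, ?_⟩
      simp only [List.length_take, List.length_map]
      omega
    rw [hAf, hBf]
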